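-- pv_equiv track=rewrite | github.com/Darya-Kuzmich/my-codewars-solutions | 6_kyu/phonewords.py | phone_words
-- ===== SOURCE A (Python) =====
-- KEYPAD = {
--     '0': [' '],
--     '2': ['a', 'b', 'c'],
--     '3': ['d', 'e', 'f'],
--     '4': ['g', 'h', 'i'],
--     '5': ['j', 'k', 'l'],
--     '6': ['m', 'n', 'o'],
--     '7': ['p', 'q', 'r', 's'],
--     '8': ['t', 'u', 'v'],
--     '9': ['w', 'x', 'y', 'z'],
-- }
--
-- def phone_words(strng: str) -> str:
--     cnt = 0
--     current = ''
--     syms = []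
--     for sym in strng:
--         if sym == current:
--             cnt += 1
--         elif sym == '1':
--             cnt = 0
--             continue
--         else:
--             current = sym
--             cnt = 1
--         syms.append((sym, cnt))
--
--     for idx in range(1, len(syms)):
--         if syms[idx][0] == syms[idx-1][0] and syms[idx][1] > syms[idx-1][1]:
--             syms[idx-1] = None
--
--     syms = [el for el in syms if el]
--
--     letters = []
--
--     for sym, cnt in syms:
--         if sym == '0':
--             letters.append(cnt * KEYPAD[sym][0])
--         else:
--             try:
--                 letters.append(KEYPAD[sym][cnt-1])
--             except IndexError:
--                 whole_parts = cnt // len(KEYPAD[sym])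
--                 remainder = cnt % len(KEYPAD[sym])
--                 for _ in range(whole_parts):
--                     letters.append(KEYPAD[sym][-1])
--                 if remainder:
--                     letters.append(KEYPAD[sym][remainder-1])
--     return ''.join(letters)
-- ===== SOURCE B (Python) =====
-- KEYPAD = {
--     '2': 'abc', '3': 'def', '4': 'ghi', '5': 'jkl',
--     '6': 'mno', '7': 'pqrs', '8': 'tuv', '9': 'wxyz',
-- }
--
--
-- def _group_text(d, length):
--     if d == '1':
--         return ''
--     if d == '0':
--         return ' ' * length
--     letters = KEYPAD[d]
--     n = len(letters)
--     if length <= n: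
--         return letters[length - 1]
--     return letters[-1] * (length // n) + (letters[length % n - 1] if length % n else '')
--
--
-- def phone_words(strng: str) -> str:
--     out = []
--     i = 0
--     end = len(strng)
--     while i < end:
--         d = strng[i]
--         j = i + 1
--         while j < end and strng[j] == d:
--             j += 1
--         out.append(_group_text(d, j - i))
--         i = j
--     return ''.join(out)
-- ===== Notes on version B (the rewrite author's own statement) =====
-- stated objective: simpler
-- what changed: B scans the string once with a two-pointer run-length sweep and maps each run (digit, length) directly to its letters, replacing A's three passes (per-char counter fold, index-mutating max-collapse pass, filter) over an intermediate (sym,cnt) list.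
import Mathlib
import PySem

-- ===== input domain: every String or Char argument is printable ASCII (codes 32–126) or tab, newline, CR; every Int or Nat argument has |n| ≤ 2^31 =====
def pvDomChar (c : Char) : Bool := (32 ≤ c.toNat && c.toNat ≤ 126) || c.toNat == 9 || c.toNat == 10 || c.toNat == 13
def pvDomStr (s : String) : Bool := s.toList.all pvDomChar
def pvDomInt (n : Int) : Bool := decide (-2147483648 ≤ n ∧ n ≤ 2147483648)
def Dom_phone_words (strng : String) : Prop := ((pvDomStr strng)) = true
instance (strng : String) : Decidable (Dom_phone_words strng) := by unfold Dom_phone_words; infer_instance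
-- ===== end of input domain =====

-- B replaces A's three passes (per-char counter fold, index-mutating collapse pass, filter)
-- by a single run-length sweep mapping each (digit, run length) directly to letters; objective: simpler.

-- ===== PORT A =====
-- KEYPAD lookup: none = key absent (Python KeyError, excluded by Pre_)
def kpA (c : Char) : Option (List Char) :=
  if c = '0' then some [' ']
  else if c = '2' then some ['a','b','c']
  else if c = '3' then some ['d','e','f']
  else if c = '4' then some ['g','h','i']
  else if c = '5' then some ['j','k','l']
  else if c = '6' then some ['m','n','o']
  else if c = '7' then some ['p','q','r','s']
  else if c = '8' then some ['t','u','v']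
  else if c = '9' then some ['w','x','y','z']
  else none

-- first loop of A: state (cnt, current, syms); current = none is Python's initial ''
def stepA (st : Int × Option Char × List (Char × Int)) (sym : Char) :
    Int × Option Char × List (Char × Int) :=
  if some sym = st.2.1 then (st.1 + 1, st.2.1, st.2.2 ++ [(sym, st.1 + 1)])
  else if sym = '1' then (0, st.2.1, st.2.2)
  else (1, some sym, st.2.2 ++ [(sym, 1)])

-- second loop of A: syms[idx-1] = None when the next entry beats it
def markStep (syms : List (Char × Int)) (acc : List (Option (Char × Int))) (idx : Int) :
    List (Option (Char × Int)) :=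
  match PySem.List.pyGet? syms idx, PySem.List.pyGet? syms (idx - 1) with
  | some a, some b => if a.1 = b.1 ∧ b.2 < a.2 then acc.set (idx - 1).toNat none else acc
  | _, _ => acc

-- third loop of A: letters.append(...) per (sym, cnt); pieces kept as List Char
def emitA (letters : List (List Char)) (p : Char × Int) : List (List Char) :=
  if p.1 = '0' then letters ++ [List.replicate p.2.toNat ' ']
  else
    match kpA p.1 with
    | none => letters   -- Python raises KeyError here; such inputs are outside Pre_
    | some ls =>
      match PySem.List.pyGet? ls (p.2 - 1) with
      | some c => letters ++ [[c]]
      | none =>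
        let w := letters ++ List.replicate (PySem.Int.floordiv p.2 (ls.length : Int)).toNat
            [((PySem.List.pyGet? ls (-1)).getD ' ')]
        if PySem.Int.mod p.2 (ls.length : Int) ≠ 0 then
          w ++ [[(PySem.List.pyGet? ls (PySem.Int.mod p.2 (ls.length : Int) - 1)).getD ' ']]
        else w

def phone_words (strng : String) : String :=
  let syms := (strng.toList.foldl stepA (0, none, [])).2.2
  let marked := (PySem.List.pyRange 1 (syms.length : Int) 1).foldl (markStep syms) (syms.map some)
  let syms2 := marked.filterMap id
  String.ofList (PySem.Chars.join [] (syms2.foldl emitA []))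

-- ===== PORT B =====
def kpB (c : Char) : List Char :=
  if c = '2' then ['a','b','c']
  else if c = '3' then ['d','e','f']
  else if c = '4' then ['g','h','i']
  else if c = '5' then ['j','k','l']
  else if c = '6' then ['m','n','o']
  else if c = '7' then ['p','q','r','s']
  else if c = '8' then ['t','u','v']
  else if c = '9' then ['w','x','y','z']
  else []   -- Python raises KeyError here; such inputs are outside Pre_

-- inner while loop of B: count the leading run of d, return (run length - 1, remainder)
def takeRun (d : Char) : List Char → Nat × List Char
  | [] => (0, [])
  | c :: cs => if c = d then ((takeRun d cs).1 + 1, (takeRun d cs).2) else (0, c :: cs)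

theorem takeRun_snd_length (d : Char) (cs : List Char) : (takeRun d cs).2.length ≤ cs.length := by
  induction cs with
  | nil => simp [takeRun]
  | cons c cs ih => by_cases h : c = d <;> simp [takeRun, h] <;> omega

-- _group_text of B
def emitB (d : Char) (L : Nat) : List Char :=
  if d = '1' then []
  else if d = '0' then List.replicate L ' '
  else
    let ls := kpB d
    if L ≤ ls.length then [ls.getD (L - 1) ' ']
    else List.replicate (L / ls.length) (ls.getD (ls.length - 1) ' ') ++
         (if L % ls.length ≠ 0 then [ls.getD (L % ls.length - 1) ' '] else [])

-- outer while loop of B: one piece per run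
def goB : List Char → List (List Char)
  | [] => []
  | d :: rest =>
    emitB d ((takeRun d rest).1 + 1) :: goB (takeRun d rest).2
  termination_by l => l.length
  decreasing_by have := takeRun_snd_length d rest; simp; omega

def phone_words_alt (strng : String) : String :=
  String.ofList (PySem.Chars.join [] (goB strng.toList))

-- ===== PRECONDITION & SPEC =====
-- Pre_ excludes exactly the inputs on which A raises: any non-digit character is
-- appended to syms and later reaches KEYPAD[sym], raising KeyError; digit-only
-- strings are exactly those on which A returns.
def Pre_phone_words (strng : String) : Prop :=
  strng.toList.all (fun c => decide (c ∈ ['0','1','2','3','4','5','6','7','8','9'])) = true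
instance (strng : String) : Decidable (Pre_phone_words strng) := by
  unfold Pre_phone_words; infer_instance

def pvWitness_phone_words : String := "20220"

def Spec_phone_words (strng : String) (out : String) : Prop := out = phone_words_alt strng
instance (strng : String) (out : String) : Decidable (Spec_phone_words strng out) := by
  unfold Spec_phone_words; infer_instance

-- ===== CLAIM (what is proved, stated in full; the proofs are below) =====
def Claim_equal_phone_words : Prop := ∀ (strng : String), Dom_phone_words strng →
  Pre_phone_words strng → Spec_phone_words strng (phone_words strng)

-- ===== LEMMAS AND PROOFS =====

-- run block (d, start), (d, start+1), …, L entries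
def blockOff (d : Char) (start : Int) (L : Nat) : List (Char × Int) :=
  (List.range L).map (fun i => (d, start + Int.ofNat i))

-- what A's first pass produces, run by run
def specSyms : List Char → List (Char × Int)
  | [] => []
  | d :: rest =>
    (if d = '1' then [] else blockOff d 1 ((takeRun d rest).1 + 1)) ++ specSyms (takeRun d rest).2
  termination_by l => l.length
  decreasing_by have := takeRun_snd_length d rest; simp; omega

-- what A's second pass keeps, run by run (= the run summaries B uses)
def runSum : List Char → List (Char × Int)
  | [] => []
  | d :: rest =>
    (if d = '1' then [] else [(d, (((takeRun d rest).1 + 1 : Nat) : Int))]) ++ runSum (takeRun d rest).2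
  termination_by l => l.length
  decreasing_by have := takeRun_snd_length d rest; simp; omega

-- pairwise view of A's second pass
def pairMark : List (Char × Int) → List (Option (Char × Int))
  | [] => []
  | [a] => [some a]
  | a :: b :: t => (if b.1 = a.1 ∧ a.2 < b.2 then none else some a) :: pairMark (b :: t)

theorem takeRun_eq (d : Char) (cs : List Char) :
    List.replicate (takeRun d cs).1 d ++ (takeRun d cs).2 = cs := by
  induction cs with
  | nil => simp [takeRun]
  | cons c cs ih =>
    by_cases h : c = d
    · simp [takeRun, h, List.replicate_succ]; exact ih
    · simp [takeRun, h]

theorem takeRun_head (d : Char) (cs : List Char) :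
    ∀ x, (takeRun d cs).2.head? = some x → x ≠ d := by
  induction cs with
  | nil => simp [takeRun]
  | cons c cs ih =>
    by_cases h : c = d
    · simpa [takeRun, h] using ih
    · simp [takeRun, h]



theorem blockOff_succ (d : Char) (start : Int) (L : Nat) :
    blockOff d start (L + 1) = (d, start) :: blockOff d (start + 1) L := by
  unfold blockOff
  rw [List.range_succ_eq_map, List.map_cons, List.map_map]
  refine congrArg₂ _ (by simp) ?_
  apply List.map_congr_left; intro i _
  simp [Function.comp, Nat.succ_eq_add_one]
  push_cast; ring_nf

theorem ones_fold (k : Nat) (cur : Option Char) (acc : List (Char × Int)) (h : cur ≠ some '1') :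
    List.foldl stepA (0, cur, acc) (List.replicate k '1') = (0, cur, acc) := by
  induction k with
  | zero => simp
  | succ n ih =>
    rw [List.replicate_succ, List.foldl_cons]
    have hs : stepA (0, cur, acc) '1' = (0, cur, acc) := by
      simp [stepA, Ne.symm h]
    rw [hs, ih]

theorem run_fold (d : Char) (k : Nat) : ∀ (cnt : Int) (acc : List (Char × Int)),
    List.foldl stepA (cnt, some d, acc) (List.replicate k d) =
      (cnt + k, some d, acc ++ blockOff d (cnt + 1) k) := by
  induction k with
  | zero => intro cnt acc; simp [blockOff]
  | succ n ih =>
    intro cnt acc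
    rw [List.replicate_succ, List.foldl_cons]
    have hs : stepA (cnt, some d, acc) d = (cnt + 1, some d, acc ++ [(d, cnt + 1)]) := by
      simp [stepA]
    rw [hs, ih]
    rw [blockOff_succ]
    refine Prod.ext (by push_cast; ring) (Prod.ext rfl (by simp))

theorem pass1_spec : ∀ (n : Nat) (cs : List Char), cs.length ≤ n →
    ∀ (cnt : Int) (cur : Option Char) (acc : List (Char × Int)),
    cur ≠ some '1' →
    (∀ d, cs.head? = some d → cnt = 0 ∨ cur ≠ some d) →
    ∃ c' u', List.foldl stepA (cnt, cur, acc) cs = (c', u', acc ++ specSyms cs) := by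
  intro n
  induction n with
  | zero =>
    intro cs hlen cnt cur acc h1 hf
    have : cs = [] := List.eq_nil_of_length_eq_zero (Nat.le_zero.mp hlen)
    subst this
    exact ⟨cnt, cur, by simp [specSyms]⟩
  | succ n ih =>
    intro cs hlen cnt cur acc h1 hf
    match cs with
    | [] => exact ⟨cnt, cur, by simp [specSyms]⟩
    | d :: rest =>
      have hsplit : List.replicate (takeRun d rest).1 d ++ (takeRun d rest).2 = rest :=
        takeRun_eq d rest
      have hlen2 : (takeRun d rest).2.length ≤ n := by
        have := takeRun_snd_length d rest
        simp at hlen; omega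
      by_cases hd : d = '1'
      · subst hd
        -- first step: the '1' branch
        have hs : stepA (cnt, cur, acc) '1' = (0, cur, acc) := by
          simp [stepA, Ne.symm h1]
        have hfold : List.foldl stepA (0, cur, acc) rest =
            List.foldl stepA (0, cur, acc) (takeRun '1' rest).2 := by
          conv_lhs => rw [← hsplit]
          rw [List.foldl_append, ones_fold _ _ _ h1]
        rw [List.foldl_cons, hs, hfold]
        obtain ⟨c', u', hrec⟩ := ih (takeRun '1' rest).2 hlen2 0 cur acc h1
          (fun d _ => Or.inl rfl)
        refine ⟨c', u', ?_⟩
        rw [hrec]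
        rw [specSyms]
        simp
      · -- first step: new (or restarted) run of d
        have hs : stepA (cnt, cur, acc) d = (1, some d, acc ++ [(d, 1)]) := by
          rcases hf d rfl with h0 | hne
          · subst h0
            by_cases he : some d = cur <;> simp [stepA, he, hd]
          · simp [stepA, Ne.symm hne, hd]
        have hfold : List.foldl stepA (1, some d, acc ++ [(d, 1)]) rest =
            List.foldl stepA (1 + ((takeRun d rest).1 : Int), some d,
              acc ++ [(d, 1)] ++ blockOff d (1 + 1) (takeRun d rest).1) (takeRun d rest).2 := by
          conv_lhs => rw [← hsplit]
          rw [List.foldl_append, run_fold]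
        rw [List.foldl_cons, hs, hfold]
        have hfresh : ∀ d', (takeRun d rest).2.head? = some d' → (1 + ((takeRun d rest).1 : Int) = 0 ∨ some d ≠ some d') := by
          intro d' hh
          exact Or.inr (by simpa using (takeRun_head d rest d' hh).symm)
        obtain ⟨c', u', hrec⟩ := ih (takeRun d rest).2 hlen2 (1 + (takeRun d rest).1)
          (some d) (acc ++ [(d, 1)] ++ blockOff d (1 + 1) (takeRun d rest).1)
          (by simpa using hd) hfresh
        refine ⟨c', u', ?_⟩
        rw [hrec, specSyms]
        simp [hd, blockOff_succ]

theorem pairMark_length (l : List (Char × Int)) : (pairMark l).length = l.length := by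
  induction l with
  | nil => rfl
  | cons a t ih =>
    cases t with
    | nil => rfl
    | cons b t' => simp [pairMark] at *; omega

theorem pairMark_get? (l : List (Char × Int)) : ∀ (k : Nat), (pairMark l)[k]? =
    match l[k]?, l[k+1]? with
    | some a, some b => some (if b.1 = a.1 ∧ a.2 < b.2 then none else some a)
    | some a, none => some (some a)
    | none, _ => none := by
  induction l with
  | nil => intro k; simp [pairMark]
  | cons a t ih =>
    intro k
    cases t with
    | nil =>
      match k with
      | 0 => rfl
      | k + 1 => simp [pairMark]
    | cons b t' =>
      match k with
      | 0 => simp [pairMark]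
      | k + 1 =>
        rw [pairMark]
        simpa using ih k

theorem take_append_drop_eq {α : Type} (A B : List α) (k : Nat) (hA : A.length = B.length)
    (hk : k ≤ A.length) (h : ∀ j, k ≤ j → A[j]? = B[j]?) : A.take k ++ B.drop k = A := by
  apply List.ext_getElem?
  intro j
  by_cases hj : j < k
  · rw [List.getElem?_append_left (by simp; omega), List.getElem?_take_of_lt hj]
  · rw [List.getElem?_append_right (by simp; omega)]
    simp [List.getElem?_drop]
    have : k + (j - min k A.length) = j := by omega
    rw [this, ← h j (by omega)]

theorem pm_high (syms : List (Char × Int)) (k : Nat) (hk1 : syms.length ≤ k + 1)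
    (hk2 : k ≤ syms.length) :
    (pairMark syms).take k ++ (syms.map some).drop k = pairMark syms := by
  apply take_append_drop_eq _ _ _ (by simp [pairMark_length]) (by simp [pairMark_length, hk2])
  intro j hj
  by_cases hjl : j < syms.length
  · have hj1 : j + 1 = syms.length := by omega
    rw [pairMark_get? syms j]
    have h1 : syms[j]? = some syms[j] := List.getElem?_eq_getElem hjl
    have h2 : syms[j+1]? = none := List.getElem?_eq_none (by omega)
    rw [h1, h2]
    simp [hjl]
  · rw [List.getElem?_eq_none (by simp [pairMark_length]; omega),
      List.getElem?_eq_none (by simp; omega)]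

theorem fold_mark (syms : List (Char × Int)) : ∀ (m k : Nat), k + m = syms.length →
    List.foldl (markStep syms) ((pairMark syms).take k ++ (syms.map some).drop k)
      (PySem.List.pyRange ((k : Int) + 1) (syms.length : Int) 1) = pairMark syms := by
  intro m
  induction m with
  | zero =>
    intro k hk
    rw [PySem.List.pyRange_one_eq_nil (by push_cast; omega)]
    simp only [List.foldl_nil]
    exact pm_high syms k (by omega) (by omega)
  | succ m ih =>
    intro k hk
    by_cases hlast : k + 1 = syms.length
    · rw [PySem.List.pyRange_one_eq_nil (by push_cast; omega)]
      simp only [List.foldl_nil]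
      exact pm_high syms k (by omega) (by omega)
    · have hklt : k + 1 < syms.length := by omega
      rw [PySem.List.pyRange_one_cons (by exact_mod_cast hklt)]
      rw [List.foldl_cons]
      have hstep : markStep syms ((pairMark syms).take k ++ (syms.map some).drop k) ((k : Int) + 1)
          = (pairMark syms).take (k + 1) ++ (syms.map some).drop (k + 1) := by
        have hg1 : PySem.List.pyGet? syms ((k : Int) + 1) = some syms[k+1] := by
          have : ((k : Int) + 1) = ((k + 1 : Nat) : Int) := by push_cast; ring
          rw [this, PySem.List.pyGet?_natCast, List.getElem?_eq_getElem hklt]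
        have hg2 : PySem.List.pyGet? syms ((k : Int) + 1 - 1) = some syms[k] := by
          have : ((k : Int) + 1 - 1) = ((k : Nat) : Int) := by push_cast; ring
          rw [this, PySem.List.pyGet?_natCast, List.getElem?_eq_getElem (by omega)]
        have hkpm : k < (pairMark syms).length := by rw [pairMark_length]; omega
        unfold markStep
        rw [hg1, hg2]
        dsimp only
        have hAk : (pairMark syms)[k]'hkpm = (if syms[k+1].1 = syms[k].1 ∧ syms[k].2 < syms[k+1].2
            then none else some syms[k]) := by
          have := pairMark_get? syms k
          rw [List.getElem?_eq_getElem hklt, List.getElem?_eq_getElem (by omega : k < syms.length)] at this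
          simp at this
          rw [List.getElem?_eq_getElem hkpm] at this
          exact Option.some.inj this
        have htakeA : (pairMark syms).take (k + 1) = (pairMark syms).take k ++ [(pairMark syms)[k]'hkpm] := by
          rw [List.take_succ, List.getElem?_eq_getElem hkpm]
          rfl
        have hdropB : (syms.map some).drop k = some syms[k] :: (syms.map some).drop (k + 1) := by
          rw [List.drop_eq_getElem_cons (by simp; omega)]
          simp
        split_ifs with hcond
        · have : ((k : Int) + 1 - 1).toNat = k := by omega
          rw [this, hdropB]
          rw [List.set_append_right _ _ (by first | (simp [List.length_take]; omega) | simp [List.length_take] | omega)]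
          have hlen : ((pairMark syms).take k).length = k := by
            simp [List.length_take, pairMark_length]; omega
          rw [hlen]
          simp
          rw [htakeA, hAk, if_pos hcond]
          simp
        · rw [hdropB, htakeA, hAk, if_neg hcond]
          simp
      rw [hstep]
      have := ih (k + 1) (by omega)
      have hc : ((k + 1 : Nat) : Int) + 1 = (k : Int) + 1 + 1 := by push_cast; ring
      rw [hc] at this
      exact this

theorem marked_eq (syms : List (Char × Int)) :
    (PySem.List.pyRange 1 (syms.length : Int) 1).foldl (markStep syms) (syms.map some) =
      pairMark syms := by
  have := fold_mark syms syms.length 0 (by omega)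
  simpa using this

theorem specSyms_head (cs : List Char) :
    ∀ p, (specSyms cs).head? = some p → p.2 = 1 := by
  induction hn : cs.length using Nat.strong_induction_on generalizing cs with
  | _ n ih =>
    match cs with
    | [] => intro p hp; simp [specSyms] at hp
    | d :: rest =>
      intro p hp
      rw [specSyms] at hp
      by_cases hd : d = '1'
      · subst hd
        simp at hp
        refine ih (takeRun '1' rest).2.length ?_ _ rfl p ?_
        · have := takeRun_snd_length '1' rest; subst hn; simp; omega
        · exact hp
      · rw [if_neg hd] at hp
        rw [blockOff_succ] at hp
        simp at hp
        rw [← hp]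

theorem pm_filter_block (d : Char) : ∀ (L : Nat) (s : List (Char × Int)) (start : Int),
    1 ≤ start → (∀ p, s.head? = some p → p.2 = 1) → 1 ≤ L →
    List.filterMap id (pairMark (blockOff d start L ++ s)) =
      (d, start + (L : Int) - 1) :: List.filterMap id (pairMark s) := by
  intro L
  induction L with
  | zero => intro s start h1 h2 h3; omega
  | succ L ihL =>
    intro s start hstart hhead _
    rw [blockOff_succ]
    by_cases hL : L = 0
    · subst hL
      simp only [blockOff, List.range_zero, List.map_nil]
      match s with
      | [] => simp [pairMark]
      | q :: t =>
        have hq : q.2 = 1 := hhead q rfl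
        rw [List.cons_append, List.nil_append]  -- shape (d,start) :: q :: t
        rw [pairMark]
        rw [if_neg (by rw [hq]; rintro ⟨-, h⟩; omega)]
        simp
    · have hL1 : 1 ≤ L := by omega
      have hblock : ∃ t, blockOff d (start + 1) L ++ s = (d, start + 1) :: t := by
        match hE : L, hL with
        | (m+1), _ => exact ⟨blockOff d (start + 1 + 1) m ++ s, by rw [blockOff_succ]; simp⟩
      obtain ⟨t, ht⟩ := hblock
      rw [List.cons_append, ht, pairMark]
      rw [if_pos (by constructor <;> simp <;> omega)]
      rw [← ht]
      have := ihL s (start + 1) (by omega) hhead hL1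
      simp only [List.filterMap_cons]
      simp only [id] at this ⊢
      rw [this]
      congr 2
      push_cast; ring

theorem collapse_spec (cs : List Char) :
    List.filterMap id (pairMark (specSyms cs)) = runSum cs := by
  induction hn : cs.length using Nat.strong_induction_on generalizing cs with
  | _ n ih =>
    match cs with
    | [] => simp [specSyms, runSum, pairMark]
    | d :: rest =>
      have hrec : List.filterMap id (pairMark (specSyms (takeRun d rest).2)) =
          runSum (takeRun d rest).2 := by
        refine ih (takeRun d rest).2.length ?_ _ rfl
        have := takeRun_snd_length d rest; subst hn; simp; omega
      rw [specSyms, runSum]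
      by_cases hd : d = '1'
      · subst hd
        simpa using hrec
      · rw [if_neg hd, if_neg hd]
        rw [pm_filter_block d ((takeRun d rest).1 + 1) (specSyms (takeRun d rest).2) 1
          (by omega) (fun p hp => specSyms_head _ p hp) (by omega)]
        rw [hrec]
        congr 2
        push_cast; ring

theorem emitA_append (letters : List (List Char)) (p : Char × Int) :
    emitA letters p = letters ++ emitA [] p := by
  unfold emitA
  split_ifs with h0
  · simp
  · cases hk : kpA p.1 with
    | none => simp
    | some ls =>
      dsimp only
      cases hg : PySem.List.pyGet? ls (p.2 - 1) with
      | some c => simp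
      | none =>
        dsimp only
        split_ifs with hm <;> simp

theorem join_nil_eq_flatten (l : List (List Char)) : PySem.Chars.join [] l = l.flatten := by
  induction l with
  | nil => rfl
  | cons a t ih => cases t <;> simp_all [PySem.Chars.join_cons_cons, PySem.Chars.join_singleton]

theorem emit_one_core (d : Char) (ls : List Char) (hA : kpA d = some ls) (hB : kpB d = ls)
    (h0 : d ≠ '0') (h1 : d ≠ '1') (hne : ls ≠ []) (L : Nat) (hL : 1 ≤ L) :
    (emitA [] (d, (L : Int))).flatten = emitB d L := by
  have hlen : 0 < ls.length := List.length_pos_iff.mpr hne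
  unfold emitA emitB
  dsimp only
  rw [if_neg h0, if_neg h1, if_neg h0, hA, hB]
  dsimp only
  have hc1 : ((L : Int) - 1) = ((L - 1 : Nat) : Int) := by omega
  by_cases hle : L ≤ ls.length
  · have hg : PySem.List.pyGet? ls ((L : Int) - 1) = some (ls[L-1]'(by omega)) := by
      rw [hc1, PySem.List.pyGet?_natCast, List.getElem?_eq_getElem (by omega)]
    rw [hg, if_pos hle]
    dsimp only
    simp [List.getD_eq_getElem?_getD, List.getElem?_eq_getElem (show L - 1 < ls.length by omega)]
  · have hg : PySem.List.pyGet? ls ((L : Int) - 1) = none := by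
      rw [hc1, PySem.List.pyGet?_natCast, List.getElem?_eq_none (by omega)]
    rw [hg, if_neg hle]
    dsimp only
    have hfd : (PySem.Int.floordiv (L : Int) (ls.length : Int)).toNat = L / ls.length := by
      rw [PySem.Int.floordiv_natCast]; exact Int.toNat_natCast _
    have hmd : PySem.Int.mod (L : Int) (ls.length : Int) = ((L % ls.length : Nat) : Int) :=
      PySem.Int.mod_natCast L ls.length
    have hlast : (PySem.List.pyGet? ls (-1)).getD ' ' = ls.getD (ls.length - 1) ' ' := by
      rw [PySem.List.pyGet?_neg_one, List.getLast?_eq_getElem?, List.getD_eq_getElem?_getD]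
    rw [hfd, hmd, hlast]
    by_cases hm : L % ls.length = 0
    · rw [if_neg (by simp [hm]), if_neg (by omega)]
      simp
    · rw [if_pos (by exact_mod_cast hm), if_pos hm]
      have hg2 : (PySem.List.pyGet? ls (((L % ls.length : Nat) : Int) - 1)).getD ' ' =
          ls.getD (L % ls.length - 1) ' ' := by
        have : (((L % ls.length : Nat) : Int) - 1) = ((L % ls.length - 1 : Nat) : Int) := by omega
        rw [this, PySem.List.pyGet?_natCast, List.getD_eq_getElem?_getD]
      rw [hg2]
      simp

theorem emit_one (d : Char) (hd : d ∈ ['0','1','2','3','4','5','6','7','8','9']) (h1 : d ≠ '1')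
    (L : Nat) (hL : 1 ≤ L) : (emitA [] (d, (L : Int))).flatten = emitB d L := by
  fin_cases hd
  · simp [emitA, emitB]
  · exact absurd rfl h1
  all_goals exact emit_one_core _ _ rfl rfl (by decide) (by decide) (by decide) L hL

theorem final_eq : ∀ (n : Nat) (cs : List Char), cs.length ≤ n →
    (∀ c ∈ cs, c ∈ ['0','1','2','3','4','5','6','7','8','9']) →
    ((runSum cs).flatMap (emitA [])).flatten = (goB cs).flatten := by
  intro n
  induction n with
  | zero =>
    intro cs hlen hall
    have : cs = [] := List.eq_nil_of_length_eq_zero (Nat.le_zero.mp hlen)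
    subst this
    simp [runSum, goB]
  | succ n ih =>
    intro cs hlen hall
    match cs with
    | [] => simp [runSum, goB]
    | d :: rest =>
      have hsub : ∀ c ∈ (takeRun d rest).2, c ∈ ['0','1','2','3','4','5','6','7','8','9'] := by
        intro c hc
        apply hall
        have := takeRun_eq d rest
        rw [← this] at *
        simp
        right; right
        exact hc
      have hlen2 : (takeRun d rest).2.length ≤ n := by
        have := takeRun_snd_length d rest
        simp at hlen; omega
      have hrec := ih (takeRun d rest).2 hlen2 hsub
      rw [runSum, goB]
      by_cases hd : d = '1'
      · subst hd
        simp only [reduceIte]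
        rw [List.flatten_cons]
        have : emitB '1' ((takeRun '1' rest).1 + 1) = [] := by simp [emitB]
        rw [this, List.nil_append]
        exact hrec
      · rw [if_neg hd]
        rw [List.flatMap_append, List.flatten_append, List.flatten_cons]
        simp only [List.flatMap_cons, List.flatMap_nil, List.append_nil]
        rw [emit_one d (hall d (by simp)) hd ((takeRun d rest).1 + 1) (by omega)]
        rw [hrec]

-- ===== VERDICT (by name: the statement is the Claim_ definition above) =====
theorem phone_words_spec : Claim_equal_phone_words := by
  intro strng hdom hpre
  unfold Spec_phone_words phone_words phone_words_alt
  apply congrArg String.ofList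
  obtain ⟨c', u', h1⟩ := pass1_spec strng.toList.length strng.toList le_rfl 0 none []
    (by simp) (fun d _ => Or.inr (by simp))
  have hsyms : (strng.toList.foldl stepA (0, none, [])).2.2 = specSyms strng.toList := by
    rw [h1]; simp
  rw [hsyms, marked_eq, collapse_spec]
  have hfold : (runSum strng.toList).foldl emitA [] = (runSum strng.toList).flatMap (emitA []) := by
    have := PySem.List.foldl_congr_mem
      (l := runSum strng.toList) (init := ([] : List (List Char)))
      (f := emitA) (g := fun acc x => acc ++ emitA [] x)
      (fun acc x _ => emitA_append acc x)
    rw [this, PySem.List.foldl_append_eq_flatMap]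
    simp
  rw [hfold, join_nil_eq_flatten, join_nil_eq_flatten]
  refine final_eq strng.toList.length strng.toList le_rfl ?_
  intro c hc
  have := List.all_eq_true.mp hpre c hc
  simpa using this
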